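-- pv_equiv track=rewrite | github.com/AravRaja/freya | backend/main.py | _is_good_ocr_word
-- ===== SOURCE A (Python) =====
-- def _is_good_ocr_word(tok: str) -> bool:
--     """Heuristic: does this token look like a real word (used for OCR page quality scoring)?
--     Requires ≥5 alpha chars, mostly alphabetic, vowels present in natural ratio,
--     and no alternating-case artifacts (e.g. 'HhUhUh' from image texture noise)."""
--     alpha = [c for c in tok if c.isalpha()]
--     if len(alpha) < 5:
--         return False
--     if len(alpha) / len(tok) < 0.75:
--         return False
--     vowels = sum(1 for c in alpha if c in "aeiouAEIOU")
--     vowel_ratio = vowels / len(alpha)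
--     if vowel_ratio < 0.15 or vowel_ratio > 0.75:
--         return False
--     # Reject alternating-case artifacts like "HhUhUh" (5+ alternations)
--     alternations = sum(
--         1 for i in range(1, len(alpha))
--         if alpha[i].isupper() != alpha[i - 1].isupper()
--     )
--     if alternations > 2:
--         return False
--     return True
-- ===== SOURCE B (Python) =====
-- def _is_good_ocr_word(tok: str) -> bool:
--     """Single pass over tok with running counters; exact integer threshold tests
--     (4a>=3n, 20v>=3a, 4v<=3a) replace the float-ratio divisions of the original."""
--     alpha_count = 0
--     vowel_count = 0
--     alternations = 0
--     prev_upper = None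
--     for c in tok:
--         if c.isalpha():
--             alpha_count += 1
--             if c in "aeiouAEIOU":
--                 vowel_count += 1
--             u = c.isupper()
--             if prev_upper is not None and u != prev_upper:
--                 alternations += 1
--             prev_upper = u
--     return (alpha_count >= 5
--             and 4 * alpha_count >= 3 * len(tok)
--             and 20 * vowel_count >= 3 * alpha_count
--             and 4 * vowel_count <= 3 * alpha_count
--             and alternations <= 2)
-- ===== Notes on version B (the rewrite author's own statement) =====
-- stated objective: simpler
-- what changed: Replaces the filtered-list build plus three separate scans (two via float ratio divisions, one via index-based range) with a single pass over tok maintaining running counters (alpha, vowel, alternation, previous-case bit) and exact integer threshold comparisons instead of float divisions.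
import Mathlib
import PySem

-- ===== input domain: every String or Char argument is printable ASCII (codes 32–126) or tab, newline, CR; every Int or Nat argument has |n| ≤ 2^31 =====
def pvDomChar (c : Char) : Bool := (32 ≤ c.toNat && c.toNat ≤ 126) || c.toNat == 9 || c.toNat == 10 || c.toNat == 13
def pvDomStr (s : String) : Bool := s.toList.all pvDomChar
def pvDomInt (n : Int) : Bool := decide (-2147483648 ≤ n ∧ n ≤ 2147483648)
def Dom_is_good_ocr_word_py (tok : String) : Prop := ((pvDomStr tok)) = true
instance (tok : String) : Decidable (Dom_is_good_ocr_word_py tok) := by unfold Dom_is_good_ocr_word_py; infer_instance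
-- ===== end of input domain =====

-- B is a single pass over tok with running counters and exact integer threshold tests,
-- replacing A's filtered-list build plus three separate scans with float divisions (objective: simpler).
-- The float ratio tests of A (alpha/len < 0.75, vowel ratio vs 0.15/0.75) are ported as the
-- exact rational comparisons 4a<3n, 20v<3a, 4v>3a; these agree with the float computation for
-- every input of representable size.

-- ===== PORT A =====
def is_good_ocr_word_py (tok : String) : Bool :=
  -- alpha = [c for c in tok if c.isalpha()]
  let alpha : List Char :=
    tok.toList.foldl (fun acc c => if PySem.Chars.isalpha c then acc ++ [c] else acc) []
  if alpha.length < 5 then false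
  else if 4 * alpha.length < 3 * tok.toList.length then false
  else
    -- vowels = sum(1 for c in alpha if c in "aeiouAEIOU")
    let vowels : Int :=
      alpha.foldl (fun acc c => if "aeiouAEIOU".toList.contains c then acc + 1 else acc) 0
    if 20 * vowels < 3 * (alpha.length : Int) ∨ 4 * vowels > 3 * (alpha.length : Int) then false
    else
      -- alternations = sum(1 for i in range(1, len(alpha)) if alpha[i].isupper() != alpha[i-1].isupper())
      let alternations : Int :=
        (PySem.List.pyRange 1 (alpha.length : Int) 1).foldl
          (fun acc i =>
            if PySem.Chars.isupper (PySem.List.pyGetD alpha i ' ')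
                ≠ PySem.Chars.isupper (PySem.List.pyGetD alpha (i - 1) ' ')
            then acc + 1 else acc) 0
      if alternations > 2 then false else true

-- ===== PORT B =====
def is_good_ocr_word_py_alt (tok : String) : Bool :=
  let s : Int × Int × Int × Option Bool :=
    tok.toList.foldl
      (fun st c =>
        if PySem.Chars.isalpha c then
          let u := PySem.Chars.isupper c
          (st.1 + 1,
           st.2.1 + (if "aeiouAEIOU".toList.contains c then 1 else 0),
           st.2.2.1 + (match st.2.2.2 with
                       | some p => if u ≠ p then 1 else 0
                       | none => 0),
           some u)
        else st)
      (0, 0, 0, none)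
  decide (5 ≤ s.1) &&
    decide (3 * (tok.toList.length : Int) ≤ 4 * s.1) &&
    decide (3 * s.1 ≤ 20 * s.2.1) &&
    decide (4 * s.2.1 ≤ 3 * s.1) &&
    decide (s.2.2.1 ≤ 2)

-- ===== PRECONDITION & SPEC =====
def Spec_is_good_ocr_word_py (tok : String) (out : Bool) : Prop := out = is_good_ocr_word_py_alt tok
instance (tok : String) (out : Bool) : Decidable (Spec_is_good_ocr_word_py tok out) := by unfold Spec_is_good_ocr_word_py; infer_instance

-- ===== CLAIM (what is proved, stated in full; the proofs are below) =====
def Claim_equal_is_good_ocr_word_py : Prop := ∀ (tok : String), Dom_is_good_ocr_word_py tok → Spec_is_good_ocr_word_py tok (is_good_ocr_word_py tok)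

-- ===== LEMMAS AND PROOFS =====

-- number of case alternations along a list of case bits, given the previous bit
def altAux (p : Option Bool) : List Bool → Int
  | [] => 0
  | b :: rest => (match p with | some q => if b ≠ q then 1 else 0 | none => 0) + altAux (some b) rest

-- the case bit of the last element, or the carried-in one
def lastB (p : Option Bool) (l : List Bool) : Option Bool :=
  match l.getLast? with | some b => some b | none => p

lemma altAux_append_singleton (p : Option Bool) (l : List Bool) (b : Bool) :
    altAux p (l ++ [b]) =
      altAux p l + (match lastB p l with | some q => if b ≠ q then 1 else 0 | none => 0) := by
  induction l generalizing p with
  | nil => simp [altAux, lastB]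
  | cons x xs ih =>
      have h : lastB p (x :: xs) = lastB (some x) xs := by cases xs <;> simp [lastB, List.getLast?_cons]
      simp only [List.cons_append, altAux, ih (some x), h, add_assoc]

-- B's fold computes the filter-based counters
lemma b_fold_char (cs : List Char) :
    ∀ (a v alt : Int) (p : Option Bool),
      cs.foldl
        (fun (st : Int × Int × Int × Option Bool) c =>
          if PySem.Chars.isalpha c then
            let u := PySem.Chars.isupper c
            (st.1 + 1,
             st.2.1 + (if "aeiouAEIOU".toList.contains c then 1 else 0),
             st.2.2.1 + (match st.2.2.2 with
                         | some q => if u ≠ q then 1 else 0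
                         | none => 0),
             some u)
          else st)
        (a, v, alt, p)
      = (a + ((cs.filter PySem.Chars.isalpha).length : Int),
         v + (↑((cs.filter PySem.Chars.isalpha).countP (fun c => "aeiouAEIOU".toList.contains c)) : Int),
         alt + altAux p ((cs.filter PySem.Chars.isalpha).map PySem.Chars.isupper),
         lastB p ((cs.filter PySem.Chars.isalpha).map PySem.Chars.isupper)) := by
  induction cs with
  | nil => intro a v alt p; simp [lastB, altAux]
  | cons c cs ih =>
      intro a v alt p
      by_cases hc : PySem.Chars.isalpha c
      · have h : lastB p (PySem.Chars.isupper c :: (cs.filter PySem.Chars.isalpha).map PySem.Chars.isupper)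
            = lastB (some (PySem.Chars.isupper c)) ((cs.filter PySem.Chars.isalpha).map PySem.Chars.isupper) := by
          cases hcs : (cs.filter PySem.Chars.isalpha).map PySem.Chars.isupper <;>
            simp [lastB, List.getLast?_cons]
        rw [List.foldl_cons]
        simp only [hc, if_pos]
        rw [ih]
        refine Prod.ext ?_ (Prod.ext ?_ (Prod.ext ?_ ?_))
        · simp [List.filter_cons, hc]; push_cast; ring
        · simp only [List.filter_cons, hc, if_pos, List.countP_cons]
          split_ifs <;> push_cast <;> ring
        · simp only [List.filter_cons, hc, if_pos, List.map_cons, altAux]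
          cases p <;> simp [altAux] <;> ring
        · simp [List.filter_cons, hc, h]
      · rw [List.foldl_cons]
        simp only [hc]
        rw [if_neg (by simp [hc]), ih]
        simp [List.filter_cons, hc]

-- A's indexed range-count equals altAux over the case bits
lemma a_alt_count (l : List Char) :
    (PySem.List.pyRange 1 (l.length : Int) 1).foldl
      (fun acc i =>
        if PySem.Chars.isupper (PySem.List.pyGetD l i ' ')
            ≠ PySem.Chars.isupper (PySem.List.pyGetD l (i - 1) ' ')
        then acc + 1 else acc) 0
    = altAux none (l.map PySem.Chars.isupper) := by
  induction l using List.reverseRecOn with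
  | nil => simp [altAux, PySem.List.pyRange_one_eq_nil]
  | append_singleton t c ih =>
      rcases t.eq_nil_or_concat.symm with h | rfl
      · obtain ⟨L, b, rfl⟩ := h
        simp only [List.concat_eq_append] at ih ⊢
        have hlen : (((L ++ [b]) ++ [c]).length : Int) = ((L ++ [b]).length : Int) + 1 := by
          simp [List.length_append] <;> omega
        rw [hlen, PySem.List.pyRange_one_succ_right (by simp [List.length_append] <;> omega),
          List.foldl_append]
        have hcong :
            (PySem.List.pyRange 1 ((L ++ [b]).length : Int) 1).foldl
              (fun acc i =>
                if PySem.Chars.isupper (PySem.List.pyGetD ((L ++ [b]) ++ [c]) i ' ')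
                    ≠ PySem.Chars.isupper (PySem.List.pyGetD ((L ++ [b]) ++ [c]) (i - 1) ' ')
                then acc + 1 else acc) (0 : Int)
            = (PySem.List.pyRange 1 ((L ++ [b]).length : Int) 1).foldl
              (fun acc i =>
                if PySem.Chars.isupper (PySem.List.pyGetD (L ++ [b]) i ' ')
                    ≠ PySem.Chars.isupper (PySem.List.pyGetD (L ++ [b]) (i - 1) ' ')
                then acc + 1 else acc) (0 : Int) := by
          apply PySem.List.foldl_congr_mem
          intro acc i hi
          obtain ⟨h1, h2⟩ := (PySem.List.mem_pyRange_one).1 hi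
          have e1 : PySem.List.pyGetD ((L ++ [b]) ++ [c]) i ' ' = PySem.List.pyGetD (L ++ [b]) i ' ' := by
            rw [PySem.List.pyGetD_eq_getElem _ _ (by omega) (by simp at h2 ⊢; omega),
                PySem.List.pyGetD_eq_getElem _ _ (by omega) (by simp at h2 ⊢; omega)]
            rw [List.getElem_append_left (by simp at h2 ⊢; omega)]
          have e2 : PySem.List.pyGetD ((L ++ [b]) ++ [c]) (i - 1) ' ' = PySem.List.pyGetD (L ++ [b]) (i - 1) ' ' := by
            rw [PySem.List.pyGetD_eq_getElem _ _ (by omega) (by simp at h2 ⊢; omega),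
                PySem.List.pyGetD_eq_getElem _ _ (by omega) (by simp at h2 ⊢; omega)]
            rw [List.getElem_append_left (by simp at h2 ⊢; omega)]
          rw [e1, e2]
        rw [hcong, ih, List.foldl_cons, List.foldl_nil]
        have elast : PySem.List.pyGetD ((L ++ [b]) ++ [c]) (((L ++ [b]).length : Int)) ' ' = c := by
          rw [PySem.List.pyGetD_eq_getElem _ _ (by positivity) (by simp)]
          simp
        have eprev : PySem.List.pyGetD ((L ++ [b]) ++ [c]) (((L ++ [b]).length : Int) - 1) ' ' = b := by
          have hidx : ((L ++ [b]).length : Int) - 1 = ((L.length : Nat) : Int) := by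
            simp [List.length_append] <;> omega
          rw [hidx, PySem.List.pyGetD_natCast]
          simp [List.getD]
        rw [elast, eprev]
        have hmap : ((L ++ [b]) ++ [c]).map PySem.Chars.isupper
            = ((L ++ [b]).map PySem.Chars.isupper) ++ [PySem.Chars.isupper c] := by simp
        rw [hmap, altAux_append_singleton]
        have hlastB : lastB none ((L ++ [b]).map PySem.Chars.isupper) = some (PySem.Chars.isupper b) := by
          simp [lastB]
        rw [hlastB]
        by_cases hb : PySem.Chars.isupper c = PySem.Chars.isupper b <;> simp [hb]
      · simp [altAux, PySem.List.pyRange_one_eq_nil]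


-- ===== VERDICT (by name: the statement is the Claim_ definition above) =====
theorem is_good_ocr_word_py_spec : Claim_equal_is_good_ocr_word_py := by
  intro tok _
  unfold Spec_is_good_ocr_word_py
  simp only [is_good_ocr_word_py, is_good_ocr_word_py_alt,
    PySem.List.foldl_append_if_eq_filter, List.nil_append,
    PySem.List.foldl_if_add_one, a_alt_count, b_fold_char, zero_add]
  have hv : (List.filter PySem.Chars.isalpha tok.toList).countP
        (fun c => "aeiouAEIOU".toList.contains c)
      = (List.filter PySem.Chars.isalpha tok.toList).countP "aeiouAEIOU".toList.contains := rfl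
  simp only [hv]
  split_ifs with h1 h2 h3 h4 <;>
    (rw [Bool.eq_iff_iff];
     simp only [Bool.and_eq_true, decide_eq_true_eq, Bool.false_eq_true, false_iff,
       eq_self_iff_true, true_iff, not_and, not_le, not_lt] <;> omega)
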